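-- pv_equiv track=rewrite | github.com/N1ck7/CodeWars_python | 6 kyu Smallest Permutation.py | min_permutation
-- ===== SOURCE A (Python) =====
-- def min_permutation(n):
--     min = ''
--     ind = 0
--     if n >= 0:
--         x = [int(a) for a in str(n)]
--         x.sort()
--         if x[0] == 0 and len(x)>1:
--             i = 0
--             while x[i] == 0:
--                 i +=1
--             x[0] = x[i]
--             x[i] = 0
--         for i in x:
--             min = min + str(i)
--         min = int(min)
--         return min
--     if n < 0:
--         n = n * -1
--         x = [int(a) for a in str(n)]
--         x.sort()
--
--         if x[0] == 0 and len(x)>1: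
--             i = 0
--             while x[i] == 0:
--                 i +=1
--             x[0] = x[i]
--             x[i] = 0
--         for i in x:
--             min = min + str(i)
--         min = int(min) * -1
--         return min
-- ===== SOURCE B (Python) =====
-- def min_permutation(n):
--     sign = -1 if n < 0 else 1
--     digs = [int(c) for c in str(abs(n))]
--     lead = 0
--     for d in range(1, 10):
--         if d in digs:
--             lead = d
--             break
--     if lead:
--         out = [lead] + [0] * digs.count(0) + [d for d in range(1, 10) for _ in range(digs.count(d) - (d == lead))]
--     else:
--         out = [0] * digs.count(0)
--     return sign * int(''.join(map(str, out)))
-- ===== Notes on version B (the rewrite author's own statement) =====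
-- stated objective: alternative
-- what changed: B replaces A's comparison sort plus while-loop leading-zero swap by a digit tally and direct construction: smallest nonzero digit present first, then all zeros, then the remaining digits in ascending order.
import Mathlib
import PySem

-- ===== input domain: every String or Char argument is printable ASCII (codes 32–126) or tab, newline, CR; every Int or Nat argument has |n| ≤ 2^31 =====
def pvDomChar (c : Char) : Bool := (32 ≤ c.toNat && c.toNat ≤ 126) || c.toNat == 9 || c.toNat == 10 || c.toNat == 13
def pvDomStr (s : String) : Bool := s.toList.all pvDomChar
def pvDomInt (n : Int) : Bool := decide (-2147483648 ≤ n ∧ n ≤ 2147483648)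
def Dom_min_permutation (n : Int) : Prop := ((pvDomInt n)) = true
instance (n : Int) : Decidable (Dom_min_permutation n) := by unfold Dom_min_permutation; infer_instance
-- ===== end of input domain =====

-- B replaces A's comparison sort + while-loop leading-zero swap by a count-then-construct
-- pass (smallest nonzero digit present first, then the zeros, then the remaining digits
-- ascending); objective: alternative (different algorithm, similar cost).


-- ===== PORT A =====
-- int(a) for a single character a (total form; every char fed to it here is a decimal digit, so Python never raises)
def pvDigit (a : Char) : Int := (PySem.Int.ofChars? [a]).getD 0

-- the while loop 'i = 0; while x[i] == 0: i += 1' (fuel = list length bounds the scan; on every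
-- input reachable from str(n) the loop stops at a nonzero digit before the fuel runs out)
def paScan (x : List Int) : Nat → Nat → Nat
  | 0, i => i
  | fuel+1, i => if PySem.List.pyGetD x (i : Int) 0 = 0 then paScan x fuel (i+1) else i

-- A's body after the digit list is built: x.sort(), the conditional leading-zero swap,
-- and the 'for i in x: min = min + str(i)' string-building loop
def paBuild (x0 : List Int) : List Char :=
  let x := PySem.List.sorted x0 (fun v => v) false
  let x :=
    if PySem.List.pyGetD x 0 0 = 0 ∧ 1 < x.length then
      let i := paScan x x.length 0
      let t := PySem.List.pyGetD x (i : Int) 0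
      PySem.List.pySetD (PySem.List.pySetD x 0 t) (i : Int) 0
    else x
  x.foldl (fun mn i => mn ++ PySem.Int.toChars i) []

def min_permutation (n : Int) : Int :=
  if n ≥ 0 then
    (PySem.Int.ofChars? (paBuild ((PySem.Int.toChars n).map pvDigit))).getD 0
  else
    (PySem.Int.ofChars? (paBuild ((PySem.Int.toChars (n * -1)).map pvDigit))).getD 0 * -1

-- ===== PORT B =====
-- 'for d in range(1, 10): if d in digs: lead = d; break'
def pbLead (digs : List Int) : List Int → Int
  | [] => 0
  | d :: rest => if digs.contains d then d else pbLead digs rest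

-- the digit list 'out' of Source B: the smallest nonzero digit present (if any),
-- then all the zeros, then the remaining digits ascending
def pbBuild (digs : List Int) : List Int :=
  let lead := pbLead digs (PySem.List.pyRange 1 10 1)
  if lead ≠ 0 then
    [lead] ++ List.replicate (PySem.List.count digs 0) 0
      ++ (PySem.List.pyRange 1 10 1).flatMap
          (fun d => List.replicate
            (((PySem.List.count digs d : Int) - (if d = lead then 1 else 0)).toNat) d)
  else
    List.replicate (PySem.List.count digs 0) 0

def min_permutation_alt (n : Int) : Int :=
  let sign : Int := if n < 0 then -1 else 1
  let digs := (PySem.Int.toChars (if n < 0 then -n else n)).map pvDigit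
  let out := pbBuild digs
  sign * (PySem.Int.ofChars? (PySem.Chars.join [] (out.map PySem.Int.toChars))).getD 0

-- ===== PRECONDITION & SPEC =====
def Spec_min_permutation (n : Int) (out : Int) : Prop := out = min_permutation_alt n
instance (n : Int) (out : Int) : Decidable (Spec_min_permutation n out) := by unfold Spec_min_permutation; infer_instance

-- ===== CLAIM (what is proved, stated in full; the proofs are below) =====
def Claim_equal_min_permutation : Prop := ∀ (n : Int), Dom_min_permutation n → Spec_min_permutation n (min_permutation n)

-- ===== LEMMAS AND PROOFS =====

-- ''.join of a list of strings is concatenation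
theorem pvJoin_nil_flatten (L : List (List Char)) : PySem.Chars.join [] L = L.flatten := by
  induction L with
  | nil => rfl
  | cons x rest ih =>
    cases rest with
    | nil => simp [PySem.Chars.join, List.intercalate]
    | cons y t =>
      rw [PySem.Chars.join_cons_cons, List.flatten_cons, ← ih]
      simp

-- pvDigit inverts Nat.digitChar on decimal digits
theorem pvDigit_digitChar (k : Nat) (hk : k ≤ 9) : pvDigit (Nat.digitChar k) = (k : Int) := by
  interval_cases k <;> decide

-- str(n) for 0 ≤ n: nonempty decimal-digit chars, leading digit nonzero unless n = 0
theorem pvToDigitsCore_spec (fuel n : Nat) (ds : List Char) (h : n < fuel) :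
    ∃ L : List Nat, Nat.toDigitsCore 10 fuel n ds = L.map Nat.digitChar ++ ds ∧ L ≠ [] ∧
      (∀ k ∈ L, k ≤ 9) ∧ (n ≠ 0 → L.head? ≠ some 0) := by
  induction fuel generalizing n ds with
  | zero => omega
  | succ fuel ih =>
    by_cases h10 : n / 10 = 0
    · refine ⟨[n % 10], ?_, by simp, ?_, ?_⟩
      · simp [Nat.toDigitsCore, h10]
      · intro k hk; simp at hk; omega
      · intro hn
        have : n % 10 ≠ 0 := by omega
        simp [this]
    · have hlt : n / 10 < fuel := by omega
      obtain ⟨L, hEq, hne, hb, hhd⟩ := ih (n / 10) (Nat.digitChar (n % 10) :: ds) hlt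
      refine ⟨L ++ [n % 10], ?_, by simp, ?_, ?_⟩
      · simp only [Nat.toDigitsCore, h10, hEq]
        simp
      · intro k hk; simp at hk
        rcases hk with hk | hk
        · exact hb k hk
        · omega
      · intro _
        cases L with
        | nil => exact absurd rfl hne
        | cons a L' =>
          have := hhd h10
          simpa using this

-- the digit list [int(a) for a in str(m)] for 0 ≤ m: nonempty, digits 0..9,
-- and when it has more than one entry some entry is nonzero
theorem pvDigs_spec (m : Int) (hm : 0 ≤ m) :
    ((PySem.Int.toChars m).map pvDigit) ≠ [] ∧
    (∀ d ∈ (PySem.Int.toChars m).map pvDigit, 0 ≤ d ∧ d ≤ 9) ∧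
    (1 < ((PySem.Int.toChars m).map pvDigit).length →
      ∃ d ∈ (PySem.Int.toChars m).map pvDigit, d ≠ 0) := by
  have hnl : ¬ m < 0 := by omega
  obtain ⟨L, hEq, hne, hb, hhd⟩ := pvToDigitsCore_spec (m.toNat + 1) m.toNat [] (by omega)
  have hchars : PySem.Int.toChars m = L.map Nat.digitChar := by
    simp [PySem.Int.toChars, hnl, Nat.toDigits, hEq]
  have hdigs : (PySem.Int.toChars m).map pvDigit = L.map (Nat.cast : Nat → Int) := by
    rw [hchars, List.map_map]
    exact List.map_congr_left (fun k hk => pvDigit_digitChar k (hb k hk))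
  rw [hdigs]
  refine ⟨by simpa using hne, ?_, ?_⟩
  · intro d hd
    simp at hd
    obtain ⟨k, hk, rfl⟩ := hd
    have := hb k hk
    constructor <;> omega
  · intro hlen
    by_cases hm0 : m = 0
    · exfalso
      subst hm0
      have h0 : L.map Nat.digitChar = ['0'] := by
        rw [← hchars]; decide
      have hL : L.length = 1 := by
        have := congrArg List.length h0
        simpa using this
      rw [List.length_map] at hlen
      omega
    · have hhd' := hhd (by omega)
      cases L with
      | nil => exact absurd rfl hne
      | cons a L' =>
        refine ⟨(a : Int), by simp, ?_⟩
        simp at hhd'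
        exact_mod_cast hhd'

-- the ascending run of copies of the digits a, a+1, …, a+k-1, each as often as in digs
def pvCanon (digs : List Int) (a : Int) (k : Nat) : List Int :=
  (List.range k).flatMap
    (fun (i : Nat) => List.replicate (List.count (a + (i : Int)) digs) (a + (i : Int)))

theorem pvCanon_succ (digs : List Int) (a : Int) (k : Nat) :
    pvCanon digs a (k+1) = List.replicate (List.count a digs) a ++ pvCanon digs (a+1) k := by
  unfold pvCanon
  rw [List.range_succ_eq_map, List.flatMap_cons, List.flatMap_map]
  simp only [Nat.cast_zero, add_zero]
  congr 1
  refine List.flatMap_congr ?_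
  intro i _
  have h : a + ((Nat.succ i : Nat) : Int) = a + 1 + (i : Int) := by push_cast; ring
  rw [h]

theorem pvMem_canon {digs : List Int} {a : Int} {k : Nat} {x : Int} (hx : x ∈ pvCanon digs a k) :
    a ≤ x ∧ x < a + k := by
  unfold pvCanon at hx
  simp only [List.mem_flatMap, List.mem_range, List.mem_replicate] at hx
  obtain ⟨i, hi, _, rfl⟩ := hx
  omega

theorem pvCanon_pairwise (digs : List Int) (a : Int) (k : Nat) :
    (pvCanon digs a k).Pairwise (· ≤ ·) := by
  induction k generalizing a with
  | zero => exact List.Pairwise.nil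
  | succ k ih =>
    rw [pvCanon_succ, List.pairwise_append]
    refine ⟨?_, ih (a+1), ?_⟩
    · rw [List.pairwise_replicate]; right; exact le_refl a
    · intro x hx y hy
      rw [List.eq_of_mem_replicate hx]
      have := pvMem_canon hy
      omega

theorem pvCount_canon_zero (digs : List Int) (v a : Int) (k : Nat)
    (h : v < a ∨ a + k ≤ v) : List.count v (pvCanon digs a k) = 0 := by
  rw [List.count_eq_zero]
  intro hv
  have := pvMem_canon hv
  omega

theorem pvCount_canon (digs : List Int) (v a : Int) (k : Nat) (h1 : a ≤ v) (h2 : v < a + k) :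
    List.count v (pvCanon digs a k) = List.count v digs := by
  induction k generalizing a with
  | zero => omega
  | succ k ih =>
    rw [pvCanon_succ, List.count_append]
    by_cases hva : v = a
    · subst hva
      rw [List.count_replicate, if_pos (by simp), pvCount_canon_zero digs v (v+1) k (by omega)]
      omega
    · rw [List.count_replicate, if_neg (by simpa using Ne.symm hva), ih (a+1) (by omega) (by omega)]
      omega

theorem pvCanon_perm (digs : List Int) (hb : ∀ d ∈ digs, 0 ≤ d ∧ d ≤ 9) :
    (pvCanon digs 0 10).Perm digs := by
  rw [List.perm_iff_count]
  intro v
  by_cases hv : 0 ≤ v ∧ v < 10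
  · exact pvCount_canon digs v 0 10 hv.1 (by omega)
  · rw [pvCount_canon_zero digs v 0 10 (by omega), Eq.comm, List.count_eq_zero]
    intro hmem
    have := hb v hmem
    omega

-- 'x.sort()' on a digit list is the canonical ascending run
theorem pvSorted_eq_canon (digs : List Int) (hb : ∀ d ∈ digs, 0 ≤ d ∧ d ≤ 9) :
    PySem.List.sorted digs (fun v => v) false = pvCanon digs 0 10 :=
  PySem.List.sorted_id_eq_of_perm_of_pairwise digs _ (pvCanon_perm digs hb) (pvCanon_pairwise digs 0 10)

-- B's break-loop finds the digit that heads the ascending run of nonzero digits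
theorem pvLead_spec (digs : List Int) (k : Nat) : ∀ (a : Int), 1 ≤ a →
    (pbLead digs ((List.range k).map (fun (i : Nat) => a + (i : Int))) = 0 →
      pvCanon digs a k = []) ∧
    (pbLead digs ((List.range k).map (fun (i : Nat) => a + (i : Int))) ≠ 0 →
      1 ≤ pbLead digs ((List.range k).map (fun (i : Nat) => a + (i : Int))) ∧
      pvCanon digs a k =
        pbLead digs ((List.range k).map (fun (i : Nat) => a + (i : Int))) ::
          (List.range k).flatMap (fun (i : Nat) => List.replicate
            (List.count (a + (i : Int)) digs -
              (if a + (i : Int) = pbLead digs ((List.range k).map (fun (j : Nat) => a + (j : Int))) then 1 else 0))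
            (a + (i : Int)))) := by
  induction k with
  | zero =>
    intro a _
    refine ⟨fun _ => rfl, fun h => absurd rfl h⟩
  | succ k ih =>
    intro a ha
    have hshift : (List.range (k+1)).map (fun (i : Nat) => a + (i : Int)) =
        a :: (List.range k).map (fun (i : Nat) => (a + 1) + (i : Int)) := by
      rw [List.range_succ_eq_map, List.map_cons, List.map_map]
      simp only [Nat.cast_zero, add_zero]
      congr 1
      refine List.map_congr_left ?_
      intro i _
      show a + ((i + 1 : Nat) : Int) = a + 1 + (i : Int)
      push_cast; ring
    rw [hshift]
    by_cases hmem : digs.contains a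
    · have hmem' : a ∈ digs := by simpa using hmem
      have hcount : 0 < List.count a digs := List.count_pos_iff.mpr hmem'
      simp only [pbLead, hmem, if_pos]
      refine ⟨fun h => absurd h (by omega), fun _ => ⟨ha, ?_⟩⟩
      rw [pvCanon_succ, List.range_succ_eq_map, List.flatMap_cons, List.flatMap_map]
      simp only [Nat.cast_zero, add_zero]
      have h1 : List.replicate (List.count a digs) a =
          a :: List.replicate (List.count a digs - 1) a := by
        cases hc : List.count a digs with
        | zero => omega
        | succ c => simp [List.replicate_succ]
      rw [h1]
      simp only [List.cons_append]
      congr 1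
      congr 1
      unfold pvCanon
      refine List.flatMap_congr ?_
      intro i _
      rw [(by push_cast; ring : a + ((Nat.succ i : Nat) : Int) = a + 1 + (i : Int)),
        if_neg (by omega), Nat.sub_zero]
    · have hnm : a ∉ digs := by simpa using hmem
      have hc0 : List.count a digs = 0 := List.count_eq_zero.mpr hnm
      have hlead : pbLead digs (a :: (List.range k).map (fun (i : Nat) => (a + 1) + (i : Int))) =
          pbLead digs ((List.range k).map (fun (i : Nat) => (a + 1) + (i : Int))) := by
        simp only [pbLead]
        rw [if_neg hmem]
      rw [hlead]
      obtain ⟨ih0, ih1⟩ := ih (a+1) (by omega)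
      constructor
      · intro h0
        rw [pvCanon_succ, ih0 h0, hc0]
        simp
      · intro hne
        obtain ⟨hge, heq⟩ := ih1 hne
        refine ⟨hge, ?_⟩
        rw [pvCanon_succ, hc0, List.replicate_zero, List.nil_append, heq]
        congr 1
        rw [List.range_succ_eq_map, List.flatMap_cons, List.flatMap_map]
        simp only [Nat.cast_zero, add_zero, hc0, Nat.zero_sub, List.replicate_zero,
          List.nil_append]
        refine List.flatMap_congr ?_
        intro i _
        rw [(by push_cast; ring : a + ((Nat.succ i : Nat) : Int) = a + 1 + (i : Int))]

-- setting index m of 'replicate m x ++ y :: t'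
theorem pvSet_replicate (m : Nat) (x y v : Int) (t : List Int) :
    (List.replicate m x ++ y :: t).set m v = List.replicate m x ++ v :: t := by
  induction m with
  | zero => rfl
  | succ m ih => simp [List.replicate_succ, ih]

-- A's while loop stops exactly at the block of zeros' end
theorem pvScan_spec (z : Nat) (lead : Int) (hl : lead ≠ 0) (t : List Int) :
    ∀ (fuel i : Nat), i ≤ z → z - i < fuel →
      paScan (List.replicate z 0 ++ lead :: t) fuel i = z := by
  intro fuel
  induction fuel with
  | zero => omega
  | succ fuel ih =>
    intro i hi hf
    by_cases hiz : i < z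
    · have hget : PySem.List.pyGetD (List.replicate z 0 ++ lead :: t) (i : Int) 0 = 0 := by
        rw [PySem.List.pyGetD_natCast, List.getD_eq_getElem?_getD,
          List.getElem?_append_left (by simpa using hiz), List.getElem?_replicate,
          if_pos hiz]
        rfl
      simp only [paScan, hget, if_pos]
      exact ih (i+1) (by omega) (by omega)
    · have hiz' : i = z := by omega
      subst hiz'
      have hget : PySem.List.pyGetD (List.replicate i 0 ++ lead :: t) (i : Int) 0 = lead := by
        rw [PySem.List.pyGetD_natCast, List.getD_eq_getElem?_getD,
          List.getElem?_append_right (by simp), List.length_replicate]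
        simp
      simp only [paScan]
      rw [hget, if_neg hl]

theorem pvGetD_mid (z : Nat) (lead : Int) (t : List Int) :
    PySem.List.pyGetD (List.replicate z 0 ++ lead :: t) (z : Int) 0 = lead := by
  rw [PySem.List.pyGetD_natCast, List.getD_eq_getElem?_getD,
    List.getElem?_append_right (by simp), List.length_replicate]
  simp

theorem pvRange_eq : PySem.List.pyRange 1 10 1 =
    (List.range 9).map (fun (i : Nat) => (1 : Int) + (i : Int)) := by
  decide

-- the core: A's sort-and-swap digit list spells the same string as B's count-and-construct list
theorem pvBuild_core (digs : List Int) (hne : digs ≠ [])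
    (hb : ∀ d ∈ digs, 0 ≤ d ∧ d ≤ 9)
    (hnz : 1 < digs.length → ∃ d ∈ digs, d ≠ 0) :
    paBuild digs = (pbBuild digs).flatMap PySem.Int.toChars := by
  unfold paBuild pbBuild
  simp only [PySem.List.count, pvRange_eq]
  rw [pvSorted_eq_canon digs hb,
    PySem.List.foldl_append_eq_flatMap PySem.Int.toChars _ [], List.nil_append]
  have hsplit : pvCanon digs 0 10 = List.replicate (List.count (0:Int) digs) 0 ++ pvCanon digs 1 9 := by
    have h := pvCanon_succ digs 0 9
    norm_num at h
    exact h
  have hlen : (pvCanon digs 0 10).length = digs.length :=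
    (pvCanon_perm digs hb).length_eq
  obtain ⟨hl0, hl1⟩ := pvLead_spec digs 9 1 (le_refl 1)
  set lead := pbLead digs ((List.range 9).map (fun (i : Nat) => (1:Int) + (i : Int))) with hleaddef
  set c0 := List.count (0:Int) digs with hc0def
  by_cases hlead : lead = 0
  · -- no nonzero digit: digs is a single zero, neither side swaps or prepends
    have hT : pvCanon digs 1 9 = [] := hl0 hlead
    have hc0len : c0 = digs.length := by
      rw [← hlen, hsplit, hT]
      simp
    have hc0pos : 1 ≤ c0 := by
      have : digs.length ≠ 0 := by simpa [List.length_eq_zero_iff] using hne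
      omega
    have hc01 : c0 = 1 := by
      by_contra hgt
      obtain ⟨d, hd, hdnz⟩ := hnz (by omega)
      have hdC : d ∈ pvCanon digs 0 10 := (pvCanon_perm digs hb).mem_iff.mpr hd
      rw [hsplit, hT, List.append_nil] at hdC
      exact hdnz (List.eq_of_mem_replicate hdC)
    rw [hsplit, hT, List.append_nil, hc01]
    rw [if_neg (by simp)]
    rw [if_neg (by simpa using hlead)]
  · -- a nonzero digit exists; lead is the least one
    obtain ⟨hge, hT⟩ := hl1 hlead
    have hBT : ((List.range 9).map (fun (i : Nat) => (1:Int) + (i : Int))).flatMap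
          (fun d => List.replicate (((List.count d digs : Int) - (if d = lead then 1 else 0)).toNat) d)
        = (List.range 9).flatMap (fun (i : Nat) => List.replicate
            (List.count ((1:Int) + (i : Int)) digs -
              (if (1:Int) + (i : Int) = lead then 1 else 0)) ((1:Int) + (i : Int))) := by
      rw [List.flatMap_map]
      refine List.flatMap_congr ?_
      intro i _
      congr 1
      split_ifs <;> omega
    set tail := (List.range 9).flatMap (fun (i : Nat) => List.replicate
        (List.count ((1:Int) + (i : Int)) digs -
          (if (1:Int) + (i : Int) = lead then 1 else 0)) ((1:Int) + (i : Int))) with htaildef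
    rw [hsplit, hT]
    by_cases hz : c0 = 0
    · -- no zeros: the sorted list already starts with lead ≠ 0, A does not swap
      rw [hz, List.replicate_zero, List.nil_append,
        if_neg (by rw [PySem.List.pyGetD_zero_cons]; exact fun h => hlead h.1)]
      rw [if_pos (by simpa using hlead), hBT]
      simp
    · -- zeros present: A swaps x[0] with the first nonzero entry, at index c0
      have hcond : PySem.List.pyGetD (List.replicate c0 0 ++ lead :: tail) 0 0 = 0 ∧
          1 < (List.replicate c0 0 ++ lead :: tail).length := by
        constructor
        · have h0 : (0 : Int) = ((0 : Nat) : Int) := rfl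
          rw [h0, PySem.List.pyGetD_natCast, List.getD_eq_getElem?_getD,
            List.getElem?_append_left (by simp; omega), List.getElem?_replicate,
            if_pos (by omega)]
          rfl
        · simp
          omega
      rw [if_pos hcond]
      have hscan : paScan (List.replicate c0 0 ++ lead :: tail)
          (List.replicate c0 0 ++ lead :: tail).length 0 = c0 :=
        pvScan_spec c0 lead hlead tail _ 0 (by omega) (by simp)
      rw [hscan, pvGetD_mid]
      have hset0 : PySem.List.pySetD (List.replicate c0 0 ++ lead :: tail) 0 lead =
          lead :: (List.replicate (c0 - 1) 0 ++ lead :: tail) := by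
        obtain ⟨c0', hcc⟩ : ∃ m, c0 = m + 1 := ⟨c0 - 1, by omega⟩
        rw [hcc, List.replicate_succ, Nat.add_sub_cancel]
        simp [pysem]
      rw [hset0]
      have hc0s : (c0 : Int) = ((c0 : Nat) : Int) := rfl
      rw [hc0s, PySem.List.pySetD_natCast]
      obtain ⟨c0', hcc⟩ : ∃ m, c0 = m + 1 := ⟨c0 - 1, by omega⟩
      rw [hcc, Nat.add_sub_cancel, List.set_cons_succ, pvSet_replicate]
      have hrep : List.replicate c0' (0:Int) ++ 0 :: tail = List.replicate (c0' + 1) 0 ++ tail := by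
        rw [List.replicate_succ']
        simp
      rw [hrep]
      rw [if_pos (by simpa using hlead), hBT]
      simp

-- both ports spell the same string, hence parse to the same int
theorem pvMain (m : Int) (hm : 0 ≤ m) :
    (PySem.Int.ofChars? (paBuild ((PySem.Int.toChars m).map pvDigit))).getD 0 =
    (PySem.Int.ofChars? (PySem.Chars.join []
      ((pbBuild ((PySem.Int.toChars m).map pvDigit)).map PySem.Int.toChars))).getD 0 := by
  obtain ⟨h1, h2, h3⟩ := pvDigs_spec m hm
  rw [pvBuild_core _ h1 h2 h3, pvJoin_nil_flatten, List.flatMap_def]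

-- ===== VERDICT (by name: the statement is the Claim_ definition above) =====
theorem min_permutation_spec : Claim_equal_min_permutation := by
  intro n _
  unfold Spec_min_permutation min_permutation min_permutation_alt
  by_cases hn : 0 ≤ n
  · rw [if_pos (show n ≥ 0 from hn), if_neg (not_lt.mpr hn), if_neg (not_lt.mpr hn),
      pvMain n hn, one_mul]
  · have hlt : n < 0 := lt_of_not_ge hn
    rw [if_neg (show ¬ n ≥ 0 from hn), if_pos hlt, if_pos hlt,
      show n * -1 = -n by ring, pvMain (-n) (by omega)]
    ring
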